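-- pv_equiv track=rewrite | github.com/TomaszMielecki/pp1_clone | 04-Subroutines/kp5.py | f
-- ===== SOURCE A (Python) =====
-- def f(a,b):
--     a=int(a)
--     b=int(b)
--
--     wynik=""
--
--     if b%2==0:
--         last = b
--     elif b%2!=0:
--         last=b-1
--
--
--     if a<b:
--         for i in range (a,b+1):
--             if i%2==0 and i!=last:
--                 wynik=wynik+str(i)+","
--             elif i%2==0 and i==last:
--                 wynik=wynik+str(i)
--             else:
--                 continue
--         return wynik
--     else:
--         return False
-- ===== SOURCE B (Python) =====
-- def f(a, b):
--     a = int(a)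
--     b = int(b)
--     if a < b:
--         start = a if a % 2 == 0 else a + 1
--         return ",".join(str(i) for i in range(start, b + 1, 2))
--     else:
--         return False
-- ===== Notes on version B (the rewrite author's own statement) =====
-- stated objective: simpler
-- what changed: B drops A's precomputed 'last' sentinel and the per-element even/==last branching over the whole range: it steps directly over the even numbers with range(start, b+1, 2) and lets ','.join place the separators.
-- outside the precondition, e.g. on f(3, 3): A returns False, B returns False
import Mathlib
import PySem

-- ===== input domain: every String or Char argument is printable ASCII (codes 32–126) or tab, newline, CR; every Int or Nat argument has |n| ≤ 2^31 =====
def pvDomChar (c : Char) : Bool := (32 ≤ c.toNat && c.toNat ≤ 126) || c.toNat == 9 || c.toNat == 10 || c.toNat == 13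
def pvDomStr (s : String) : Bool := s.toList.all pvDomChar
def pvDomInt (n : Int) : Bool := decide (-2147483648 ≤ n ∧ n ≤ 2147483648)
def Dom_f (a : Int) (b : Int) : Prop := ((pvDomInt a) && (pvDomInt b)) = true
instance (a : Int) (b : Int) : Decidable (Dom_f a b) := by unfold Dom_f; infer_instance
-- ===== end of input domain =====

-- B replaces A's precomputed 'last' sentinel and 3-way per-element branching over the whole
-- range by stepping directly over the even numbers and letting join place the separators (simpler).

-- ===== PORT A =====
def f (a : Int) (b : Int) : String :=
  let wynik : String := ""
  let last : Int := if PySem.Int.mod b 2 == 0 then b else b - 1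
  if a < b then
    (PySem.List.pyRange a (b + 1) 1).foldl (fun wynik i =>
      if PySem.Int.mod i 2 == 0 && i != last then wynik ++ PySem.Int.toStr i ++ ","
      else if PySem.Int.mod i 2 == 0 && i == last then wynik ++ PySem.Int.toStr i
      else wynik) wynik
  else ""  -- Python A returns the bool False here, not a str; excluded by Pre_f

-- ===== PORT B =====
def f_alt (a : Int) (b : Int) : String :=
  if a < b then
    let start : Int := if PySem.Int.mod a 2 == 0 then a else a + 1
    PySem.Str.join "," ((PySem.List.pyRange start (b + 1) 2).map PySem.Int.toStr)
  else ""  -- Python B returns the bool False here, not a str; excluded by Pre_f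

-- ===== PRECONDITION & SPEC =====
-- Pre_f excludes a ≥ b, where A returns the bool False instead of a string.
def Pre_f (a : Int) (b : Int) : Prop := a < b
instance (a : Int) (b : Int) : Decidable (Pre_f a b) := by unfold Pre_f; infer_instance
def pvWitness_f : Int × Int := (0, 3)

def Spec_f (a : Int) (b : Int) (out : String) : Prop := out = f_alt a b
instance (a : Int) (b : Int) (out : String) : Decidable (Spec_f a b out) := by unfold Spec_f; infer_instance

-- ===== CLAIM (what is proved, stated in full; the proofs are below) =====
def Claim_equal_f : Prop := ∀ (a : Int) (b : Int), Dom_f a b → Pre_f a b → Spec_f a b (f a b)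

-- ===== LEMMAS AND PROOFS =====

lemma pymod2 (i : Int) : PySem.Int.mod i 2 = i % 2 := by
  simp [PySem.Int.mod, Int.fmod_eq_emod]

-- folding a function that ignores the elements failing p equals folding over the filtered list
lemma foldl_filter_eq {α β : Type} (p : α → Bool) (g : β → α → β)
    (hg : ∀ w i, p i = false → g w i = w) :
    ∀ (l : List α) (w : β), l.foldl g w = (l.filter p).foldl g w := by
  intro l
  induction l with
  | nil => intro w; rfl
  | cons x xs ih =>
    intro w
    by_cases h : p x = true
    · simp [h, ih]
    · simp only [Bool.not_eq_true] at h
      simp [h, hg _ _ h, ih]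

-- a strictly increasing list ending in c, folded with the "comma except at c" body, is a join
lemma foldl_last_join (c : Int) :
    ∀ (l : List Int) (w : String), l.Pairwise (· < ·) → l.getLast? = some c →
    l.foldl (fun w i => if i ≠ c then w ++ PySem.Int.toStr i ++ "," else w ++ PySem.Int.toStr i) w
      = w ++ PySem.Str.join "," (l.map PySem.Int.toStr) := by
  intro l
  induction l with
  | nil => intro w _ h; simp at h
  | cons x xs ih =>
    intro w hp hl
    cases xs with
    | nil =>
      simp only [List.getLast?_singleton, Option.some.injEq] at hl
      subst hl
      rw [← String.toList_inj]
      simp [PySem.Str.join, PySem.Chars.join, String.toList_append, List.intercalate]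
    | cons y ys =>
      have hl' : (y :: ys).getLast? = some c := by
        rw [List.getLast?_cons_cons] at hl; exact hl
      have hcmem : c ∈ y :: ys := by
        rcases List.getLast?_eq_some_iff.mp hl' with ⟨zs, hz⟩
        rw [hz]; simp
      have hxc : x ≠ c := by
        have := (List.pairwise_cons.mp hp).1 c hcmem
        omega
      have hp' : (y :: ys).Pairwise (· < ·) := (List.pairwise_cons.mp hp).2
      rw [List.foldl_cons, if_pos hxc, ih _ hp' hl']
      rw [← String.toList_inj]
      simp [PySem.Str.toList_join, PySem.Chars.join_cons_cons, String.toList_append]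
  -- termination: structural

-- the evens of range(a, b+1) are exactly range(start, b+1, 2)
lemma filter_even_pyRange (a b : Int) :
    (PySem.List.pyRange a (b + 1) 1).filter (fun i => PySem.Int.mod i 2 == 0)
      = PySem.List.pyRange (if PySem.Int.mod a 2 == 0 then a else a + 1) (b + 1) 2 := by
  set s : Int := if PySem.Int.mod a 2 == 0 then a else a + 1 with hs
  have hsparity : s % 2 = 0 ∧ a ≤ s ∧ s ≤ a + 1 := by
    rw [hs, pymod2]
    split_ifs with h
    · rw [beq_iff_eq] at h; omega
    · rw [beq_iff_eq] at h; omega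
  have h1 : ((PySem.List.pyRange a (b + 1) 1).filter (fun i => PySem.Int.mod i 2 == 0)).Pairwise (· < ·) :=
    List.Pairwise.filter _ (PySem.List.pairwise_lt_pyRange_one a (b + 1))
  have h2 : (PySem.List.pyRange s (b + 1) 2).Pairwise (· < ·) := by
    rw [PySem.List.pyRange_of_pos _ _ (by norm_num)]
    refine List.Pairwise.map _ ?_ List.pairwise_lt_range
    intro i j hij
    omega
  have hn1 : ((PySem.List.pyRange a (b + 1) 1).filter (fun i => PySem.Int.mod i 2 == 0)).Nodup :=
    h1.imp (fun h => by omega)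
  have hn2 : (PySem.List.pyRange s (b + 1) 2).Nodup := h2.imp (fun h => by omega)
  have hperm : ((PySem.List.pyRange a (b + 1) 1).filter (fun i => PySem.Int.mod i 2 == 0)).Perm
      (PySem.List.pyRange s (b + 1) 2) := by
    refine (List.perm_ext_iff_of_nodup hn1 hn2).mpr ?_
    intro x
    simp only [List.mem_filter, PySem.List.mem_pyRange_one,
      PySem.List.mem_pyRange_iff_of_pos (by norm_num : (0:Int) < 2), pymod2, beq_iff_eq]
    omega
  exact hperm.eq_of_pairwise (fun a b _ _ hab hba => by omega) h1 h2

-- a strictly increasing list containing its upper bound c ends in c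
lemma getLast?_of_max (c : Int) :
    ∀ (l : List Int), l.Pairwise (· < ·) → c ∈ l → (∀ x ∈ l, x ≤ c) → l.getLast? = some c := by
  intro l
  induction l with
  | nil => intro _ h _; simp at h
  | cons x xs ih =>
    intro hp hm hub
    cases xs with
    | nil =>
      have hxc := List.mem_singleton.mp hm
      simp [hxc]
    | cons y ys =>
      rw [List.getLast?_cons_cons]
      have hp' := (List.pairwise_cons.mp hp).2
      have hxlt := (List.pairwise_cons.mp hp).1
      have hm' : c ∈ y :: ys := by
        rcases List.mem_cons.mp hm with h | h
        · exfalso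
          have hy : x < y := hxlt y (by simp)
          have hyc := hub y (by simp)
          omega
        · exact h
      exact ih hp' hm' (fun z hz => hub z (by simp [hz]))

theorem f_eq_alt (a b : Int) (hab : a < b) : f a b = f_alt a b := by
  unfold f f_alt
  simp only [if_pos hab]
  set last : Int := if PySem.Int.mod b 2 == 0 then b else b - 1 with hlastdef
  set s : Int := if PySem.Int.mod a 2 == 0 then a else a + 1 with hs
  have hsp : s % 2 = 0 ∧ a ≤ s ∧ s ≤ a + 1 := by
    rw [hs, pymod2]
    split_ifs with h
    · rw [beq_iff_eq] at h; omega
    · rw [beq_iff_eq] at h; omega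
  have hlp : last % 2 = 0 ∧ b - 1 ≤ last ∧ last ≤ b := by
    rw [hlastdef, pymod2]
    split_ifs with h
    · rw [beq_iff_eq] at h; omega
    · rw [beq_iff_eq] at h; omega
  -- step 1: drop the odd elements
  rw [foldl_filter_eq (fun i => PySem.Int.mod i 2 == 0) _ (by
    intro w i hi
    simp only [pymod2, beq_eq_false_iff_ne, ne_eq] at hi
    have hnd : ¬ (2:Int) ∣ i := by omega
    simp [hnd])]
  rw [filter_even_pyRange a b, ← hs]
  -- step 2: on the even list the body is the "comma except at last" body
  have hmem : ∀ x ∈ PySem.List.pyRange s (b + 1) 2, x % 2 = 0 ∧ s ≤ x ∧ x < b + 1 := by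
    intro x hx
    rw [PySem.List.mem_pyRange_iff_of_pos (by norm_num : (0:Int) < 2)] at hx
    omega
  rw [PySem.List.foldl_congr_mem _ _
    (fun w i => if i ≠ last then w ++ PySem.Int.toStr i ++ "," else w ++ PySem.Int.toStr i) _ (by
      intro acc x hx
      have hx' := hmem x hx
      have h2x : (2:Int) ∣ x := by omega
      by_cases hc : x = last
      · simp [hc]
        intro h
        exfalso
        omega
      · simp [h2x, hc])]
  -- step 3: the fold is a join
  have hlmem : last ∈ PySem.List.pyRange s (b + 1) 2 := by
    rw [PySem.List.mem_pyRange_iff_of_pos (by norm_num : (0:Int) < 2)]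
    omega
  have hpw : (PySem.List.pyRange s (b + 1) 2).Pairwise (· < ·) := by
    rw [PySem.List.pyRange_of_pos _ _ (by norm_num)]
    refine List.Pairwise.map _ ?_ List.pairwise_lt_range
    intro i j hij
    omega
  have hub : ∀ x ∈ PySem.List.pyRange s (b + 1) 2, x ≤ last := by
    intro x hx
    have := hmem x hx
    omega
  rw [foldl_last_join last _ _ hpw (getLast?_of_max last _ hpw hlmem hub)]
  rw [← String.toList_inj]
  simp

-- ===== VERDICT (by name: the statement is the Claim_ definition above) =====
theorem f_spec : Claim_equal_f := by
  intro a b _ hpre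
  unfold Spec_f
  exact f_eq_alt a b hpre
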